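-- pv_equiv track=rewrite | github.com/rohwalia/Maker-portfolio | Gyroscope teslameter/20190629_gyroscope_teslameter/helper/helpers.py | buildConnMat
-- ===== SOURCE A (Python) =====
-- def buildConnMat(conns):
--     n= len(conns)
--     mat = []
--     for conn in conns:
--         row = []
--         for i in range(n):
--             row.append(conn.get(i,0))
--         mat.append(row)
--     return mat
-- ===== SOURCE B (Python) =====
-- def buildConnMat(conns):
--     # Scatter each dict's items into a pre-zeroed row instead of probing every column.
--     n = len(conns)
--     mat = []
--     for conn in conns:
--         row = [0] * n
--         for k, v in conn.items():
--             if 0 <= k < n: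
--                 row[k] = v
--         mat.append(row)
--     return mat
-- ===== Notes on version B (the rewrite author's own statement) =====
-- stated objective: alternative
-- what changed: B pre-zeroes each row and scatters only the dict's own (key,value) items whose key is a valid column index, instead of probing conn.get(i,0) for every column i; Pre_ excludes association lists with duplicate keys, which cannot arise from a real Python dict (A's first-match lookup vs B's last-write are both accidental there).
import Mathlib
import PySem

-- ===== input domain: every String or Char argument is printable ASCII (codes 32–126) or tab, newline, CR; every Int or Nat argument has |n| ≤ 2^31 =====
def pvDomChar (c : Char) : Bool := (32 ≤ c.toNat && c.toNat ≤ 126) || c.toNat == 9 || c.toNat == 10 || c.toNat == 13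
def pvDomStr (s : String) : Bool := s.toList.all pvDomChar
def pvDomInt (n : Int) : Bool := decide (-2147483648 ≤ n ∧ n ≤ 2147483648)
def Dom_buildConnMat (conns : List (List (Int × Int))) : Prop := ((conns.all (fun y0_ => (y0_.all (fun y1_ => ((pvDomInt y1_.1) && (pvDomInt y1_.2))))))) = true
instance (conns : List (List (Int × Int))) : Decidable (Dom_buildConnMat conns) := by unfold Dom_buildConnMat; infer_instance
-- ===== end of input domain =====

-- B pre-zeroes each row and scatters the dict's own items (keys that are valid column
-- indices) instead of probing conn.get(i,0) for every column; proved equal to A on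
-- association lists without duplicate keys (the only ones a Python dict can produce).


-- ===== PORT A =====
def buildConnMat (conns : List (List (Int × Int))) : List (List Int) :=
  let n : Int := conns.length
  conns.foldl (fun mat conn =>
    mat ++ [(PySem.List.pyRange 0 n 1).foldl
      (fun row i => row ++ [(conn.lookup i).getD 0]) []]) []

-- ===== PORT B =====
def buildConnMat_alt (conns : List (List (Int × Int))) : List (List Int) :=
  let n := conns.length
  conns.foldl (fun mat conn =>
    mat ++ [conn.foldl
      (fun row kv => if 0 ≤ kv.1 ∧ kv.1 < (n : Int) then row.set kv.1.toNat kv.2 else row)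
      (List.replicate n 0)]) []

-- ===== PRECONDITION & SPEC =====
-- Pre_ excludes association lists with duplicate keys: a real Python dict cannot have
-- them, so A's first-match lookup and B's last-write overwrite are both accidental there.
def Pre_buildConnMat (conns : List (List (Int × Int))) : Prop :=
  ∀ conn ∈ conns, (conn.map Prod.fst).Nodup
instance (conns : List (List (Int × Int))) : Decidable (Pre_buildConnMat conns) := by
  unfold Pre_buildConnMat; infer_instance
def pvWitness_buildConnMat : (List (List (Int × Int))) := [[(0, 5)], [(1, -2), (3, 7)]]

def Spec_buildConnMat (conns : List (List (Int × Int))) (out : List (List Int)) : Prop := out = buildConnMat_alt conns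
instance (conns : List (List (Int × Int))) (out : List (List Int)) : Decidable (Spec_buildConnMat conns out) := by unfold Spec_buildConnMat; infer_instance

-- ===== CLAIM (what is proved, stated in full; the proofs are below) =====
def Claim_equal_buildConnMat : Prop := ∀ (conns : List (List (Int × Int))), Dom_buildConnMat conns → Pre_buildConnMat conns → Spec_buildConnMat conns (buildConnMat conns)

-- ===== LEMMAS AND PROOFS =====

lemma lookup_eq_none_of_not_mem (conn : List (Int × Int)) (k : Int)
    (h : k ∉ conn.map Prod.fst) : conn.lookup k = none := by
  induction conn with
  | nil => rfl
  | cons kv rest ih =>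
    simp only [List.map_cons, List.mem_cons, not_or] at h
    rw [List.lookup, show (k == kv.1) = false from beq_eq_false_iff_ne.mpr h.1, ih h.2]

-- the scattered row, as a function of column index
lemma scatter_eq (n : Nat) (conn : List (Int × Int)) (g : Nat → Int)
    (hnod : (conn.map Prod.fst).Nodup) :
    conn.foldl
      (fun row kv => if 0 ≤ kv.1 ∧ kv.1 < (n : Int) then row.set kv.1.toNat kv.2 else row)
      ((List.range n).map g)
    = (List.range n).map (fun i : Nat => (conn.lookup (i : Int)).getD (g i)) := by
  induction conn generalizing g with
  | nil => simp [List.lookup]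
  | cons kv rest ih =>
    obtain ⟨k, v⟩ := kv
    simp only [List.map_cons, List.nodup_cons] at hnod
    have hstep :
        (if 0 ≤ k ∧ k < (n : Int) then ((List.range n).map g).set k.toNat v
         else (List.range n).map g)
        = (List.range n).map (fun i : Nat => if (i : Int) = k then v else g i) := by
      split_ifs with hk
      · apply List.ext_getElem
        · simp
        · intro j h1 h2
          simp only [List.getElem_set, List.getElem_map, List.getElem_range]
          have : j = k.toNat ↔ (j : Int) = k := by omega
          by_cases hj : k.toNat = j
          · simp [hj, this.mp hj.symm]
          · rw [if_neg hj, if_neg (fun he => hj (by omega))]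
      · apply List.map_congr_left
        intro j hj
        simp only [List.mem_range] at hj
        rw [if_neg (by omega)]
    rw [List.foldl_cons]
    simp only [hstep]
    rw [ih _ hnod.2]
    apply List.map_congr_left
    intro j hj
    by_cases hjk : (j : Int) = k
    · rw [hjk, lookup_eq_none_of_not_mem rest k hnod.1]
      simp [List.lookup]
    · rw [List.lookup, show ((j : Int) == k) = false from beq_eq_false_iff_ne.mpr hjk]
      simp [hjk]

lemma row_eq (n : Nat) (conn : List (Int × Int)) (hnod : (conn.map Prod.fst).Nodup) :
    (PySem.List.pyRange 0 (n : Int) 1).foldl (fun row i => row ++ [(conn.lookup i).getD 0]) []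
    = conn.foldl
        (fun row kv => if 0 ≤ kv.1 ∧ kv.1 < (n : Int) then row.set kv.1.toNat kv.2 else row)
        (List.replicate n 0) := by
  have hrep : List.replicate n (0 : Int) = (List.range n).map (fun _ => (0 : Int)) := by
    simp [List.map_const']
  rw [PySem.List.foldl_append_singleton_eq_map, PySem.List.pyRange_one, hrep,
      scatter_eq n conn (fun _ => 0) hnod, List.map_map]
  simp only [Int.sub_zero, Int.toNat_natCast, Function.comp_def, zero_add, List.nil_append]

-- ===== VERDICT (by name: the statement is the Claim_ definition above) =====
theorem buildConnMat_spec : Claim_equal_buildConnMat := by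
  intro conns _ hpre
  show buildConnMat conns = buildConnMat_alt conns
  unfold buildConnMat buildConnMat_alt
  rw [PySem.List.foldl_append_singleton_eq_map, PySem.List.foldl_append_singleton_eq_map]
  simp only [List.nil_append]
  apply List.map_congr_left
  intro conn hconn
  exact row_eq conns.length conn (hpre conn hconn)
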